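-- pv_equiv track=rewrite | github.com/HtetLwinKyaw/ai_cooking_assistant | src/ingredients_recipe/postprocess/ingredient_rules.py | clean_ingredients
-- ===== SOURCE A (Python) =====
-- from typing import List
--
-- DISALLOWED_BY_DISH = {
--     "spaghetti": {"flour", "egg"},
--     "spaghetti meat sauce": {"flour", "egg"},
--     "pizza": {"egg"},
--     "fried rice": {"flour"},
-- }
--
-- REQUIRED_BY_DISH = {
--     "spaghetti": {"spaghetti"},
--     "spaghetti meat sauce": {"spaghetti", "meat sauce"},
--     "pizza": {"pizza dough"},
-- }
--
-- def clean_ingredients(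
--     dish: str,
--     ingredients: List[str],
-- ) -> List[str]:
--     dish = dish.lower()
--
--     ingredients = {i.lower() for i in ingredients}
--
--     # Remove disallowed ingredients
--     for key, banned in DISALLOWED_BY_DISH.items():
--         if key in dish:
--             ingredients -= banned
--
--     # Add required ingredients
--     for key, required in REQUIRED_BY_DISH.items():
--         if key in dish:
--             ingredients |= required
--
--     return sorted(ingredients)
-- ===== SOURCE B (Python) =====
-- from typing import List
--
-- DISALLOWED_BY_DISH = {
--     "spaghetti": {"flour", "egg"},
--     "spaghetti meat sauce": {"flour", "egg"},
--     "pizza": {"egg"},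
--     "fried rice": {"flour"},
-- }
--
-- REQUIRED_BY_DISH = {
--     "spaghetti": {"spaghetti"},
--     "spaghetti meat sauce": {"spaghetti", "meat sauce"},
--     "pizza": {"pizza dough"},
-- }
--
-- def clean_ingredients(dish: str, ingredients: List[str]) -> List[str]:
--     d = dish.lower()
--     banned = {b for key, bs in DISALLOWED_BY_DISH.items() if key in d for b in bs}
--     required = sorted({r for key, rs in REQUIRED_BY_DISH.items() if key in d for r in rs})
--     xs = sorted(i.lower() for i in ingredients if i.lower() not in banned)
--     # Two-pointer merge of the two sorted lists, dropping duplicates on the fly: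
--     # no set algebra and no final sort over the combined collection.
--     out = []
--     i = j = 0
--     while i < len(xs) or j < len(required):
--         if j >= len(required) or (i < len(xs) and xs[i] <= required[j]):
--             v = xs[i]; i += 1
--         else:
--             v = required[j]; j += 1
--         if not out or out[-1] != v:
--             out.append(v)
--     return out
-- ===== Notes on version B (the rewrite author's own statement) =====
-- stated objective: alternative
-- what changed: B never forms the result set: it sorts the filtered lowercased ingredients and the required ingredients separately and produces the final sorted distinct list by a two-pointer merge with on-the-fly deduplication, instead of A's per-rule set subtractions/unions followed by one sort of the combined set.
import Mathlib
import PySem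

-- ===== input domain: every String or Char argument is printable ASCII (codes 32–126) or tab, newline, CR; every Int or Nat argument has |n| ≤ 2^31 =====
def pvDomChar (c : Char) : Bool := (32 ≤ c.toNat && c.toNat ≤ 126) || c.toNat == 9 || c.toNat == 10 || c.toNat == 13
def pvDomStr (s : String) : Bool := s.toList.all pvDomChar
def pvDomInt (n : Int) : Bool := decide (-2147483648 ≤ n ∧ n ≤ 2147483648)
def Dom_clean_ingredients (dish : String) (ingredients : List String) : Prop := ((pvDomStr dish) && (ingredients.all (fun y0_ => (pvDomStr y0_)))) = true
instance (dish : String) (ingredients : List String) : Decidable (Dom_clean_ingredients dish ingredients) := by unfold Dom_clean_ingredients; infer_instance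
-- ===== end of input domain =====

-- B builds the sorted distinct result by a two-pointer merge of two separately sorted lists (filtered ingredients; required items), replacing A's set algebra + final sort; alternative algorithm, same result.


-- the module-level rule tables (dict of dish-key → set of ingredients; each set only ever
-- subtracted/unioned or sorted, so the list order of each constant set is immaterial)
def DISALLOWED_BY_DISH : List (String × List String) :=
  [("spaghetti", ["flour", "egg"]),
   ("spaghetti meat sauce", ["flour", "egg"]),
   ("pizza", ["egg"]),
   ("fried rice", ["flour"])]

def REQUIRED_BY_DISH : List (String × List String) :=
  [("spaghetti", ["spaghetti"]),
   ("spaghetti meat sauce", ["spaghetti", "meat sauce"]),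
   ("pizza", ["pizza dough"])]

-- ===== PORT A =====
def clean_ingredients (dish : String) (ingredients : List String) : List String :=
  let d := PySem.Str.lower dish
  let ing0 : PySem.Set String := PySem.Set.ofList (ingredients.map PySem.Str.lower)
  let ing1 := DISALLOWED_BY_DISH.foldl
    (fun s kv => if PySem.Str.isIn kv.1 d then PySem.Set.diff s kv.2 else s) ing0
  let ing2 := REQUIRED_BY_DISH.foldl
    (fun s kv => if PySem.Str.isIn kv.1 d then PySem.Set.union s kv.2 else s) ing1
  PySem.List.sorted ing2 (fun x => x) false

-- ===== PORT B =====
-- 'if not out or out[-1] != v: out.append(v)'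
def pvPush (out : List String) (v : String) : List String :=
  if out.getLast? = some v then out else out ++ [v]

-- the while loop of Source B on the suffixes xs[i:], required[j:] and the accumulator out
def pvMergeDistinct : List String → List String → List String → List String
  | [], [], out => out
  | x :: xs, [], out => pvMergeDistinct xs [] (pvPush out x)
  | [], y :: ys, out => pvMergeDistinct [] ys (pvPush out y)
  | x :: xs, y :: ys, out =>
      if x ≤ y then pvMergeDistinct xs (y :: ys) (pvPush out x)
      else pvMergeDistinct (x :: xs) ys (pvPush out y)

def clean_ingredients_alt (dish : String) (ingredients : List String) : List String :=
  let d := PySem.Str.lower dish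
  let banned : PySem.Set String := PySem.Set.ofList
    (DISALLOWED_BY_DISH.flatMap (fun kv => if PySem.Str.isIn kv.1 d then kv.2 else []))
  let required := PySem.List.sorted
    (PySem.Set.ofList (REQUIRED_BY_DISH.flatMap (fun kv => if PySem.Str.isIn kv.1 d then kv.2 else [])))
    (fun x => x) false
  let xs := PySem.List.sorted
    ((ingredients.map PySem.Str.lower).filter (fun i => !(PySem.Set.contains banned i)))
    (fun x => x) false
  pvMergeDistinct xs required []

-- ===== PRECONDITION & SPEC =====
def Spec_clean_ingredients (dish : String) (ingredients : List String) (out : List String) : Prop := out = clean_ingredients_alt dish ingredients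
instance (dish : String) (ingredients : List String) (out : List String) : Decidable (Spec_clean_ingredients dish ingredients out) := by unfold Spec_clean_ingredients; infer_instance

-- ===== CLAIM (what is proved, stated in full; the proofs are below) =====
def Claim_equal_clean_ingredients : Prop := ∀ (dish : String) (ingredients : List String), Dom_clean_ingredients dish ingredients → Spec_clean_ingredients dish ingredients (clean_ingredients dish ingredients)

-- ===== LEMMAS AND PROOFS =====

-- every member of a strictly sorted list is ≤ its last element
theorem pv_mem_le_getLast (out : List String) (a : String)
    (ho : out.Pairwise (· < ·)) (ha : a ∈ out) :
    ∃ l, out.getLast? = some l ∧ a ≤ l := by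
  induction out with
  | nil => cases ha
  | cons b t ih =>
    cases t with
    | nil =>
      refine ⟨b, rfl, ?_⟩
      simp at ha; simp [ha]
    | cons c t' =>
      have hpt : (c :: t').Pairwise (· < ·) := (List.pairwise_cons.mp ho).2
      rcases List.mem_cons.mp ha with rfl | hat
      · obtain ⟨l, hl⟩ := Option.isSome_iff_exists.mp
          (List.getLast?_isSome.mpr (List.cons_ne_nil c t'))
        refine ⟨l, by rw [List.getLast?_cons_cons]; exact hl, ?_⟩
        have hlm : l ∈ c :: t' := List.mem_of_getLast? hl
        exact le_of_lt ((List.pairwise_cons.mp ho).1 l hlm)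
      · obtain ⟨l, hl, hal⟩ := ih hpt hat
        exact ⟨l, by simpa using hl, hal⟩

theorem pv_mem_pvPush (out : List String) (v a : String) :
    a ∈ pvPush out v ↔ a ∈ out ∨ a = v := by
  unfold pvPush
  split
  · rename_i h
    constructor
    · exact Or.inl
    · rintro (h' | rfl)
      · exact h'
      · exact List.mem_of_getLast? h
  · simp

theorem pv_pairwise_pvPush (out : List String) (v : String)
    (ho : out.Pairwise (· < ·)) (hle : ∀ a ∈ out, a ≤ v) :
    (pvPush out v).Pairwise (· < ·) := by
  unfold pvPush
  split
  · exact ho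
  · rename_i hne
    rw [List.pairwise_append]
    refine ⟨ho, List.pairwise_singleton _ _, ?_⟩
    intro a ha b hb
    simp at hb; subst hb
    rcases lt_or_eq_of_le (hle a ha) with h | rfl
    · exact h
    · obtain ⟨l, hl, hal⟩ := pv_mem_le_getLast out a ho ha
      have hla : l ≤ a := hle l (List.mem_of_getLast? hl)
      have hleq : l = a := le_antisymm hla hal
      exact absurd (hleq ▸ hl) hne

-- characterisation of the merge loop: strictly sorted output with union membership
theorem pv_merge_char : ∀ (xs ys out : List String),
    xs.Pairwise (· ≤ ·) → ys.Pairwise (· ≤ ·) → out.Pairwise (· < ·) →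
    (∀ a ∈ out, ∀ b ∈ xs, a ≤ b) → (∀ a ∈ out, ∀ b ∈ ys, a ≤ b) →
    (pvMergeDistinct xs ys out).Pairwise (· < ·) ∧
      ∀ a, a ∈ pvMergeDistinct xs ys out ↔ a ∈ out ∨ a ∈ xs ∨ a ∈ ys := by
  intro xs ys out
  induction xs, ys, out using pvMergeDistinct.induct with
  | case1 out =>
    intro _ _ ho _ _
    rw [pvMergeDistinct]
    exact ⟨ho, fun a => by simp⟩
  | case2 x xs out ih =>
    intro hx _ ho hox _
    have hx' := (List.pairwise_cons.mp hx).2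
    have hpw : (pvPush out x).Pairwise (· < ·) :=
      pv_pairwise_pvPush out x ho (fun a ha => hox a ha x List.mem_cons_self)
    have hb : ∀ a ∈ pvPush out x, ∀ b ∈ xs, a ≤ b := by
      intro a ha b hb
      rcases (pv_mem_pvPush out x a).mp ha with h | rfl
      · exact hox a h b (List.mem_cons_of_mem _ hb)
      · exact (List.pairwise_cons.mp hx).1 b hb
    obtain ⟨h1, h2⟩ := ih hx' (List.Pairwise.nil) hpw hb (by intro a _ b hb; cases hb)
    rw [pvMergeDistinct]
    refine ⟨h1, fun a => ?_⟩
    rw [h2 a, pv_mem_pvPush]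
    simp [or_comm, or_assoc]
    tauto
  | case3 y ys out ih =>
    intro _ hy ho _ hoy
    have hy' := (List.pairwise_cons.mp hy).2
    have hpw : (pvPush out y).Pairwise (· < ·) :=
      pv_pairwise_pvPush out y ho (fun a ha => hoy a ha y List.mem_cons_self)
    have hb : ∀ a ∈ pvPush out y, ∀ b ∈ ys, a ≤ b := by
      intro a ha b hb
      rcases (pv_mem_pvPush out y a).mp ha with h | rfl
      · exact hoy a h b (List.mem_cons_of_mem _ hb)
      · exact (List.pairwise_cons.mp hy).1 b hb
    obtain ⟨h1, h2⟩ := ih (List.Pairwise.nil) hy' hpw (by intro a _ b hb; cases hb) hb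
    rw [pvMergeDistinct]
    refine ⟨h1, fun a => ?_⟩
    rw [h2 a, pv_mem_pvPush]
    simp
    tauto
  | case4 x xs y ys out hxy ih =>
    intro hx hy ho hox hoy
    have hx' := (List.pairwise_cons.mp hx).2
    have hpw : (pvPush out x).Pairwise (· < ·) :=
      pv_pairwise_pvPush out x ho (fun a ha => hox a ha x List.mem_cons_self)
    have hbx : ∀ a ∈ pvPush out x, ∀ b ∈ xs, a ≤ b := by
      intro a ha b hb
      rcases (pv_mem_pvPush out x a).mp ha with h | rfl
      · exact hox a h b (List.mem_cons_of_mem _ hb)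
      · exact (List.pairwise_cons.mp hx).1 b hb
    have hby : ∀ a ∈ pvPush out x, ∀ b ∈ y :: ys, a ≤ b := by
      intro a ha b hb
      rcases (pv_mem_pvPush out x a).mp ha with h | rfl
      · exact hoy a h b hb
      · rcases List.mem_cons.mp hb with rfl | hb'
        · exact hxy
        · exact hxy.trans ((List.pairwise_cons.mp hy).1 b hb')
    obtain ⟨h1, h2⟩ := ih hx' hy hpw hbx hby
    rw [pvMergeDistinct, if_pos hxy]
    refine ⟨h1, fun a => ?_⟩
    rw [h2 a, pv_mem_pvPush]
    simp
    tauto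
  | case5 x xs y ys out hxy ih =>
    intro hx hy ho hox hoy
    have hy' := (List.pairwise_cons.mp hy).2
    have hylt : y ≤ x := le_of_lt (lt_of_not_ge hxy)
    have hpw : (pvPush out y).Pairwise (· < ·) :=
      pv_pairwise_pvPush out y ho (fun a ha => hoy a ha y List.mem_cons_self)
    have hby : ∀ a ∈ pvPush out y, ∀ b ∈ ys, a ≤ b := by
      intro a ha b hb
      rcases (pv_mem_pvPush out y a).mp ha with h | rfl
      · exact hoy a h b (List.mem_cons_of_mem _ hb)
      · exact (List.pairwise_cons.mp hy).1 b hb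
    have hbx : ∀ a ∈ pvPush out y, ∀ b ∈ x :: xs, a ≤ b := by
      intro a ha b hb
      rcases (pv_mem_pvPush out y a).mp ha with h | rfl
      · exact hox a h b hb
      · rcases List.mem_cons.mp hb with rfl | hb'
        · exact hylt
        · exact hylt.trans ((List.pairwise_cons.mp hx).1 b hb')
    obtain ⟨h1, h2⟩ := ih hx hy' hpw hbx hby
    rw [pvMergeDistinct, if_neg hxy]
    refine ⟨h1, fun a => ?_⟩
    rw [h2 a, pv_mem_pvPush]
    simp
    tauto

-- membership through A's conditional-subtraction loop over a rule table
theorem pv_mem_foldl_diff (t : List (String × List String)) (d : String)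
    (s : PySem.Set String) (a : String) :
    (a ∈ t.foldl (fun s kv => if PySem.Str.isIn kv.1 d then PySem.Set.diff s kv.2 else s) s) ↔
      a ∈ s ∧ ¬ ∃ kv, kv ∈ t ∧ PySem.Str.isIn kv.1 d = true ∧ a ∈ kv.2 := by
  induction t generalizing s with
  | nil => simp
  | cons kv rest ih =>
    simp only [List.foldl_cons, ih, List.mem_cons]
    by_cases h : PySem.Str.isIn kv.1 d = true
    · rw [if_pos h]
      simp only [PySem.Set.mem_diff]
      constructor
      · rintro ⟨⟨ha, hna⟩, hne⟩
        exact ⟨ha, fun ⟨kv', hkv', hc, hm⟩ => hkv'.elim (fun e => hna (e ▸ hm)) (fun hr => hne ⟨kv', hr, hc, hm⟩)⟩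
      · rintro ⟨ha, hne⟩
        exact ⟨⟨ha, fun hm => hne ⟨kv, Or.inl rfl, h, hm⟩⟩, fun ⟨kv', hr, hc, hm⟩ => hne ⟨kv', Or.inr hr, hc, hm⟩⟩
    · rw [if_neg h]
      constructor
      · rintro ⟨ha, hne⟩
        exact ⟨ha, fun ⟨kv', hkv', hc, hm⟩ => hkv'.elim (fun e => h (e ▸ hc)) (fun hr => hne ⟨kv', hr, hc, hm⟩)⟩
      · rintro ⟨ha, hne⟩
        exact ⟨ha, fun ⟨kv', hr, hc, hm⟩ => hne ⟨kv', Or.inr hr, hc, hm⟩⟩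

-- membership through A's conditional-union loop over a rule table
theorem pv_mem_foldl_union (t : List (String × List String)) (d : String)
    (s : PySem.Set String) (a : String) :
    (a ∈ t.foldl (fun s kv => if PySem.Str.isIn kv.1 d then PySem.Set.union s kv.2 else s) s) ↔
      a ∈ s ∨ ∃ kv, kv ∈ t ∧ PySem.Str.isIn kv.1 d = true ∧ a ∈ kv.2 := by
  induction t generalizing s with
  | nil => simp
  | cons kv rest ih =>
    simp only [List.foldl_cons, ih, List.mem_cons]
    by_cases h : PySem.Str.isIn kv.1 d = true
    · rw [if_pos h]
      simp only [PySem.Set.mem_union]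
      constructor
      · rintro (⟨ha | hm⟩ | ⟨kv', hr, hc, hm⟩)
        · exact Or.inl ha
        · exact Or.inr ⟨kv, Or.inl rfl, h, hm⟩
        · exact Or.inr ⟨kv', Or.inr hr, hc, hm⟩
      · rintro (ha | ⟨kv', hkv', hc, hm⟩)
        · exact Or.inl (Or.inl ha)
        · exact hkv'.elim (fun e => Or.inl (Or.inr (e ▸ hm))) (fun hr => Or.inr ⟨kv', hr, hc, hm⟩)
    · rw [if_neg h]
      constructor
      · rintro (ha | ⟨kv', hr, hc, hm⟩)
        · exact Or.inl ha
        · exact Or.inr ⟨kv', Or.inr hr, hc, hm⟩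
      · rintro (ha | ⟨kv', hkv', hc, hm⟩)
        · exact Or.inl ha
        · exact hkv'.elim (fun e => absurd hc (e ▸ h)) (fun hr => Or.inr ⟨kv', hr, hc, hm⟩)

theorem pv_nodup_foldl_diff (t : List (String × List String)) (d : String)
    (s : PySem.Set String) (hs : s.Nodup) :
    (t.foldl (fun s kv => if PySem.Str.isIn kv.1 d then PySem.Set.diff s kv.2 else s) s).Nodup := by
  induction t generalizing s with
  | nil => exact hs
  | cons kv rest ih =>
    simp only [List.foldl_cons]
    split
    · exact ih _ (PySem.Set.nodup_diff _ _ hs)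
    · exact ih _ hs

theorem pv_nodup_foldl_union (t : List (String × List String)) (d : String)
    (s : PySem.Set String) (hs : s.Nodup) :
    (t.foldl (fun s kv => if PySem.Str.isIn kv.1 d then PySem.Set.union s kv.2 else s) s).Nodup := by
  induction t generalizing s with
  | nil => exact hs
  | cons kv rest ih =>
    simp only [List.foldl_cons]
    split
    · exact ih _ (PySem.Set.nodup_union _ _ hs)
    · exact ih _ hs

-- boolean non-membership test used by B's filter
theorem pv_not_contains {α : Type} [BEq α] [LawfulBEq α] (s : PySem.Set α) (x : α) :
    ((!(PySem.Set.contains s x)) = true) ↔ x ∉ s := by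
  constructor
  · intro hb hx
    rw [(PySem.Set.contains_iff (s := s) (x := x)).mpr hx] at hb
    exact absurd hb (by simp)
  · intro hx
    have hc : PySem.Set.contains s x = false := by
      cases h : PySem.Set.contains s x
      · rfl
      · exact absurd ((PySem.Set.contains_iff (s := s) (x := x)).mp h) hx
    rw [hc]
    rfl

-- two strictly increasing lists with the same members are equal
theorem pv_strict_sorted_ext (l1 l2 : List String)
    (h1 : l1.Pairwise (· < ·)) (h2 : l2.Pairwise (· < ·))
    (hm : ∀ a, a ∈ l1 ↔ a ∈ l2) : l1 = l2 := by
  have n1 : l1.Nodup := h1.imp ne_of_lt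
  have n2 : l2.Nodup := h2.imp ne_of_lt
  have hp : l1.Perm l2 := (List.perm_ext_iff_of_nodup n1 n2).mpr hm
  exact hp.eq_of_pairwise (fun a b _ _ ha hb => absurd hb (lt_asymm ha)) h1 h2

theorem clean_ingredients_eq (dish : String) (ingredients : List String) :
    clean_ingredients dish ingredients = clean_ingredients_alt dish ingredients := by
  unfold clean_ingredients clean_ingredients_alt
  set d := PySem.Str.lower dish with hd
  -- A's side: a strictly sorted list
  have hAnodup : (DISALLOWED_BY_DISH.foldl
      (fun s kv => if PySem.Str.isIn kv.1 d then PySem.Set.diff s kv.2 else s)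
      (PySem.Set.ofList (ingredients.map PySem.Str.lower))).Nodup :=
    pv_nodup_foldl_diff _ _ _ (PySem.Set.nodup_ofList _)
  have hA2nodup := pv_nodup_foldl_union REQUIRED_BY_DISH d _ hAnodup
  have hAperm := PySem.List.sorted_perm (key := fun x : String => x) (rev := false)
    (xs := REQUIRED_BY_DISH.foldl
      (fun s kv => if PySem.Str.isIn kv.1 d then PySem.Set.union s kv.2 else s)
      (DISALLOWED_BY_DISH.foldl
        (fun s kv => if PySem.Str.isIn kv.1 d then PySem.Set.diff s kv.2 else s)
        (PySem.Set.ofList (ingredients.map PySem.Str.lower))))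
  have hAle := PySem.List.sorted_pairwise (key := fun x : String => x)
    (xs := REQUIRED_BY_DISH.foldl
      (fun s kv => if PySem.Str.isIn kv.1 d then PySem.Set.union s kv.2 else s)
      (DISALLOWED_BY_DISH.foldl
        (fun s kv => if PySem.Str.isIn kv.1 d then PySem.Set.diff s kv.2 else s)
        (PySem.Set.ofList (ingredients.map PySem.Str.lower))))
  have hAstrict : (PySem.List.sorted
      (REQUIRED_BY_DISH.foldl
        (fun s kv => if PySem.Str.isIn kv.1 d then PySem.Set.union s kv.2 else s)
        (DISALLOWED_BY_DISH.foldl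
          (fun s kv => if PySem.Str.isIn kv.1 d then PySem.Set.diff s kv.2 else s)
          (PySem.Set.ofList (ingredients.map PySem.Str.lower))))
      (fun x => x) false).Pairwise (· < ·) := by
    have hnd := hAperm.nodup_iff.mpr hA2nodup
    exact (hAle.and hnd).imp (fun h => lt_of_le_of_ne h.1 h.2)
  -- B's side: the merge of two nondecreasing lists
  have hxs := PySem.List.sorted_pairwise (key := fun x : String => x)
    (xs := (ingredients.map PySem.Str.lower).filter
      (fun i => !(PySem.Set.contains (PySem.Set.ofList
        (DISALLOWED_BY_DISH.flatMap (fun kv => if PySem.Str.isIn kv.1 d then kv.2 else []))) i)))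
  have hreq := PySem.List.sorted_pairwise (key := fun x : String => x)
    (xs := PySem.Set.ofList (REQUIRED_BY_DISH.flatMap (fun kv => if PySem.Str.isIn kv.1 d then kv.2 else [])))
  obtain ⟨hBstrict, hBmem⟩ := pv_merge_char _ _ [] hxs hreq List.Pairwise.nil
    (by intro a ha; cases ha) (by intro a ha; cases ha)
  apply pv_strict_sorted_ext _ _ hAstrict hBstrict
  intro a
  rw [hBmem a]
  rw [PySem.List.mem_sorted, pv_mem_foldl_union, pv_mem_foldl_diff]
  simp only [List.not_mem_nil, false_or, PySem.List.mem_sorted, List.mem_filter,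
    pv_not_contains, PySem.Set.mem_ofList, List.mem_flatMap]
  constructor
  · rintro (⟨ha, hn⟩ | hreq')
    · refine Or.inl ⟨ha, ?_⟩
      rintro ⟨kv, hkv, hm⟩
      by_cases hc : PySem.Str.isIn kv.1 d = true
      · rw [if_pos hc] at hm; exact hn ⟨kv, hkv, hc, hm⟩
      · rw [if_neg hc] at hm; cases hm
    · obtain ⟨kv, hkv, hc, hm⟩ := hreq'
      exact Or.inr ⟨kv, hkv, by rw [if_pos hc]; exact hm⟩
  · rintro (⟨ha, hn⟩ | ⟨kv, hkv, hm⟩)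
    · refine Or.inl ⟨ha, ?_⟩
      rintro ⟨kv, hkv, hc, hm⟩
      exact hn ⟨kv, hkv, by rw [if_pos hc]; exact hm⟩
    · by_cases hc : PySem.Str.isIn kv.1 d = true
      · rw [if_pos hc] at hm; exact Or.inr ⟨kv, hkv, hc, hm⟩
      · rw [if_neg hc] at hm; cases hm

-- ===== VERDICT (by name: the statement is the Claim_ definition above) =====
theorem clean_ingredients_spec : Claim_equal_clean_ingredients := by
  intro dish ingredients _
  unfold Spec_clean_ingredients
  exact clean_ingredients_eq dish ingredients
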